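-- pv_equiv track=rewrite | github.com/25007839d/pythonProject | src/python_project/typing_speed.py | mistake
-- ===== SOURCE A (Python) =====
-- def mistake(par_test,upa_test):
--     error =0
--     for i in range(len(par_test)):
--         try:
--             if par_test[i]!=upa_test[i]:
--                 error=error+1
--         except:
--             error=error+1
--     return error
-- ===== SOURCE B (Python) =====
-- def mistake(par_test, upa_test):
--     common = sum(1 for a, b in zip(par_test, upa_test) if a != b)
--     return common + max(0, len(par_test) - len(upa_test))
-- ===== Notes on version B (the rewrite author's own statement) =====
-- stated objective: idiomatic
-- what changed: Replaces the index loop with try/except (bare except counting IndexError overruns) by a single zip pass over character pairs plus explicit length arithmetic max(0, len(par)-len(upa)).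
import Mathlib
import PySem

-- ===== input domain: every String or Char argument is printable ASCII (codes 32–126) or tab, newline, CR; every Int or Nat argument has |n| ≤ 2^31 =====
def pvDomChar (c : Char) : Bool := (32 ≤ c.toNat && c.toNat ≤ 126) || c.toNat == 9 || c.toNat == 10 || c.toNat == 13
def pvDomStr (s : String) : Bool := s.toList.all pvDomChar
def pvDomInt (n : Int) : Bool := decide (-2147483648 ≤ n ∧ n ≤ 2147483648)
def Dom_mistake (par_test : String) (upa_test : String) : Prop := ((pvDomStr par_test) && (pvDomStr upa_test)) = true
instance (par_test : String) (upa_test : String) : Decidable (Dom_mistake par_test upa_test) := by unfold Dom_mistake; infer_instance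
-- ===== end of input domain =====

-- B replaces A's index loop with try/except by a zip pass plus length arithmetic (idiomatic; same cost).
-- ===== PORT A =====
-- for i in range(len(par_test)): try: if par_test[i]!=upa_test[i]: error+=1  except: error+=1
def mistake (par_test : String) (upa_test : String) : Int :=
  (PySem.List.pyRange 0 (PySem.Str.len par_test) 1).foldl (fun error i =>
    match PySem.Str.pyGet? par_test i, PySem.Str.pyGet? upa_test i with
    | some a, some b => if a != b then error + 1 else error
    | _, _ => error + 1) 0

-- ===== PORT B =====
def mistake_alt (par_test : String) (upa_test : String) : Int :=
  let common : Int := (par_test.toList.zip upa_test.toList).foldl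
    (fun acc ab => if ab.1 != ab.2 then acc + 1 else acc) 0
  common + max 0 ((par_test.toList.length : Int) - (upa_test.toList.length : Int))

-- ===== PRECONDITION & SPEC =====
def Spec_mistake (par_test : String) (upa_test : String) (out : Int) : Prop := out = mistake_alt par_test upa_test
instance (par_test : String) (upa_test : String) (out : Int) : Decidable (Spec_mistake par_test upa_test out) := by unfold Spec_mistake; infer_instance

-- ===== CLAIM (what is proved, stated in full; the proofs are below) =====
def Claim_equal_mistake : Prop := ∀ (par_test : String) (upa_test : String), Dom_mistake par_test upa_test → Spec_mistake par_test upa_test (mistake par_test upa_test)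

-- ===== LEMMAS AND PROOFS =====

-- counting foldl with an arbitrary accumulator peels off as an addition
theorem foldl_cnt_shift {α : Type} (q : α → Bool) (l : List α) (e : Int) :
    l.foldl (fun acc x => if q x then acc + 1 else acc) e
      = e + l.foldl (fun acc x => if q x then acc + 1 else acc) 0 := by
  induction l generalizing e with
  | nil => simp
  | cons x l ih =>
    simp only [List.foldl_cons]
    rw [ih (if q x then e + 1 else e), ih (if q x then (0:Int) + 1 else 0)]
    split <;> ring

-- A's index loop computed on the list side
theorem mistake_core (xs ys : List Char) (e : Int) :
    (List.range xs.length).foldl (fun error i =>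
        match xs[i]?, ys[i]? with
        | some a, some b => if a != b then error + 1 else error
        | _, _ => error + 1) e
      = e + (xs.zip ys).foldl (fun acc ab => if ab.1 != ab.2 then acc + 1 else acc) 0
          + max 0 ((xs.length : Int) - (ys.length : Int)) := by
  induction xs generalizing ys e with
  | nil =>
    have h : max (0:Int) (0 - (ys.length : Int)) = 0 := by omega
    simp [h]
  | cons x xs ih =>
    simp only [List.length_cons]
    rw [List.range_succ_eq_map, List.foldl_cons, List.foldl_map]
    cases ys with
    | nil =>
      have ih' := ih [] (e + 1)
      simp only [List.getElem?_nil, List.getElem?_cons_zero, List.getElem?_cons_succ] at ih' ⊢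
      rw [ih']
      simp only [List.zip_nil_right, List.foldl_nil, List.length_nil, Nat.cast_zero,
        Nat.cast_add, Nat.cast_one]
      omega
    | cons y ys =>
      have ih' := ih ys (if x != y then e + 1 else e)
      simp only [List.getElem?_cons_zero, List.getElem?_cons_succ]
      rw [ih', List.zip_cons_cons, List.foldl_cons,
        foldl_cnt_shift (fun ab => ab.1 != ab.2) (xs.zip ys)
          (if (x, y).1 != (x, y).2 then (0:Int) + 1 else 0)]
      simp only [List.length_cons, Nat.cast_add, Nat.cast_one]
      have h : max (0:Int) ((xs.length : Int) + 1 - ((ys.length : Int) + 1))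
          = max 0 ((xs.length : Int) - (ys.length : Int)) := by omega
      rw [h]
      split <;> ring

-- ===== VERDICT (by name: the statement is the Claim_ definition above) =====
theorem mistake_spec : Claim_equal_mistake := by
  intro p u _
  unfold Spec_mistake mistake mistake_alt
  rw [PySem.Str.len_eq, PySem.List.pyRange_zero_nat, List.foldl_map]
  simp only [PySem.Str.pyGet?_natCast]
  rw [mistake_core p.toList u.toList 0]
  ring
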